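-- pv_equiv track=rewrite | github.com/ankile/dtak-mhealth-rl | src/utils/trajectories.py | combined_policies
-- ===== SOURCE A (Python) =====
-- def combined_policies(optimal_list):
--     '''
--     Takes in a list of optimal paths as adjacency lists and returns a combined adjacency list
--     '''
--     combined = {}
--     for path in optimal_list:
--         for key in path:
--             if key not in combined:
--                 combined[key] = [path[key]]
--             else:
--                 # append path[key] to combined[key] if it is not already present
--                 if path[key] not in combined[key]:
--                     combined[key].append(path[key])
--     return combined
-- ===== SOURCE B (Python) =====
-- def combined_policies(optimal_list):
--     '''
--     Takes in a list of optimal paths as adjacency lists and returns a combined adjacency list.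
--     Two-phase: gather every value per key first, then dedup each value list order-preservingly.
--     '''
--     # Phase 1: gather all values per key, duplicates included.
--     table = {}
--     for path in optimal_list:
--         for key in path:
--             table.setdefault(key, []).append(path[key])
--     # Phase 2: replace each value list by its order-preserving deduplication.
--     result = {}
--     for key, vals in table.items():
--         deduped = []
--         for v in vals:
--             if v not in deduped:
--                 deduped.append(v)
--         result[key] = deduped
--     return result
-- ===== Notes on version B (the rewrite author's own statement) =====
-- stated objective: alternative
-- what changed: B replaces A's single pass that deduplicates on every insertion with a two-phase decomposition: first gather all values per key into a raw table via setdefault/append, then a second pass rewrites each value list with an order-preserving dedup loop.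
import Mathlib
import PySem

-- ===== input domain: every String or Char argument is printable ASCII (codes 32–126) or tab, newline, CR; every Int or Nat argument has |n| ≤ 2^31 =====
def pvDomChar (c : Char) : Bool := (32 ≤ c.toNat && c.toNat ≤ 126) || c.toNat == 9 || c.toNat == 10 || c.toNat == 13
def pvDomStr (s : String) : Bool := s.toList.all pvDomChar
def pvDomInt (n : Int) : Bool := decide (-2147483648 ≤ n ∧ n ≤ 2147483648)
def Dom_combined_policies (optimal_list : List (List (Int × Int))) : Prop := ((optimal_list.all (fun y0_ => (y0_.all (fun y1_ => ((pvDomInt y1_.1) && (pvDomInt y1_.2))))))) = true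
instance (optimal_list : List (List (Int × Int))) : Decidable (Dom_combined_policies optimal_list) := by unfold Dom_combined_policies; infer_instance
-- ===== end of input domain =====

-- B rebuilds the result in two phases (gather all values per key, then dedup each list)
-- instead of A's single pass with dedup-on-insert; objective: alternative decomposition.


-- ===== PORT A =====
-- one step of A's inner loop: key kv.1, value kv.2 = path[key]
def pvStepA (c : PySem.Dict Int (List Int)) (kv : Int × Int) : PySem.Dict Int (List Int) :=
  if c.contains kv.1 = false then
    c.insert kv.1 [kv.2]                               -- combined[key] = [path[key]]
  else
    let vs := c.getD kv.1 []                           -- combined[key] (present)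
    if kv.2 ∈ vs then c else c.insert kv.1 (vs ++ [kv.2])

def combined_policies (optimal_list : List (List (Int × Int))) : List (Int × List Int) :=
  (optimal_list.foldl (fun c path => path.foldl pvStepA c) PySem.Dict.empty).items

-- ===== PORT B =====
-- the small dedup loop of Source B: out=[]; for v in vals: if v not in out: out.append(v)
def pvDedupLoop (vals : List Int) : List Int :=
  vals.foldl (fun out v => if v ∈ out then out else out ++ [v]) []

def combined_policies_alt (optimal_list : List (List (Int × Int))) : List (Int × List Int) :=
  -- phase 1: table.setdefault(key, []).append(path[key])  ≡  table[key] = table.get(key, []) + [v]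
  let table := optimal_list.foldl
    (fun d path => path.foldl (fun d kv => d.insert kv.1 (d.getD kv.1 [] ++ [kv.2])) d)
    PySem.Dict.empty
  -- phase 2: result[key] = dedup(vals)
  table.items.map (fun p => (p.1, pvDedupLoop p.2))

-- ===== PRECONDITION & SPEC =====
def Spec_combined_policies (optimal_list : List (List (Int × Int))) (out : List (Int × List Int)) : Prop := out = combined_policies_alt optimal_list
instance (optimal_list : List (List (Int × Int))) (out : List (Int × List Int)) : Decidable (Spec_combined_policies optimal_list out) := by unfold Spec_combined_policies; infer_instance

-- ===== CLAIM (what is proved, stated in full; the proofs are below) =====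
def Claim_equal_combined_policies : Prop := ∀ (optimal_list : List (List (Int × Int))), Dom_combined_policies optimal_list → Spec_combined_policies optimal_list (combined_policies optimal_list)

-- ===== LEMMAS AND PROOFS =====

-- the value-wise dedup map relating B's table to A's dict
def pvF : Int × List Int → Int × List Int := fun p => (p.1, pvDedupLoop p.2)

-- one step of B's phase-1 loop
def pvStepB (d : PySem.Dict Int (List Int)) (kv : Int × Int) : PySem.Dict Int (List Int) :=
  d.insert kv.1 (d.getD kv.1 [] ++ [kv.2])

lemma pvStepB_def (optimal_list : List (List (Int × Int))) :
    combined_policies_alt optimal_list =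
      (optimal_list.foldl (fun d path => path.foldl pvStepB d) PySem.Dict.empty).items.map pvF := rfl

lemma pvDedupLoop_append (xs : List Int) (v : Int) :
    pvDedupLoop (xs ++ [v]) =
      if v ∈ pvDedupLoop xs then pvDedupLoop xs else pvDedupLoop xs ++ [v] := by
  simp [pvDedupLoop, List.foldl_append]

-- the invariant: A's dict is B's table with every value list deduplicated (and B's keys are unique)
def pvInv (cA cB : PySem.Dict Int (List Int)) : Prop :=
  cA.items = cB.items.map pvF ∧ cB.keys.Nodup

lemma pvInv_keys {cA cB : PySem.Dict Int (List Int)} (h : pvInv cA cB) : cA.keys = cB.keys := by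
  have h1 := h.1
  simp only [PySem.Dict.keys, h1, List.map_map]
  rfl

lemma pvInv_step {cA cB : PySem.Dict Int (List Int)} (kv : Int × Int) (h : pvInv cA cB) :
    pvInv (pvStepA cA kv) (pvStepB cB kv) := by
  obtain ⟨h1, hnd⟩ := h
  have hkeys : cA.keys = cB.keys := pvInv_keys ⟨h1, hnd⟩
  have hndA : cA.keys.Nodup := hkeys ▸ hnd
  have hcont : cA.contains kv.1 = cB.contains kv.1 := by
    rw [PySem.Dict.contains_eq_decide_mem_keys, PySem.Dict.contains_eq_decide_mem_keys, hkeys]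
  by_cases hc : cB.contains kv.1 = false
  · -- fresh key: both append (kv.1, [kv.2])
    have hcA : cA.contains kv.1 = false := by rw [hcont]; exact hc
    refine ⟨?_, PySem.Dict.nodup_keys_insert _ _ _ hnd⟩
    rw [pvStepA, pvStepB, if_pos hcA,
        PySem.Dict.items_insert_of_not_contains _ _ hcA,
        PySem.Dict.getD_of_not_contains _ _ hc,
        PySem.Dict.items_insert_of_not_contains _ _ hc]
    simp [h1, pvF, pvDedupLoop]
  · -- existing key
    have hcB : cB.contains kv.1 = true := by revert hc; cases cB.contains kv.1 <;> simp
    have hcA : cA.contains kv.1 = true := by rw [hcont]; exact hcB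
    -- the (unique) current value list of kv.1 in B's table
    set vsB := cB.getD kv.1 [] with hvsB
    have hsome : cB.get? kv.1 = some vsB := by
      have := PySem.Dict.contains_eq_isSome_get? cB kv.1
      rw [hcB] at this
      cases hg : cB.get? kv.1 with
      | none => rw [hg] at this; simp at this
      | some w =>
        have : cB.getD kv.1 [] = w := by rw [PySem.Dict.getD_eq_get?_getD, hg]; rfl
        rw [hvsB, this]
    have hmemB : (kv.1, vsB) ∈ cB.items := PySem.Dict.mem_items_of_get?_eq_some _ hsome
    have hmemA : (kv.1, pvDedupLoop vsB) ∈ cA.items := by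
      rw [h1]; exact List.mem_map.mpr ⟨(kv.1, vsB), hmemB, rfl⟩
    have hgetA : cA.getD kv.1 [] = pvDedupLoop vsB :=
      PySem.Dict.getD_of_mem_items _ hmemA hndA []
    -- any pair of cB.items with key kv.1 is (kv.1, vsB)
    have huniq : ∀ p ∈ cB.items, p.1 = kv.1 → p.2 = vsB := by
      intro p hp hpk
      obtain ⟨a, b⟩ := p
      simp only at hpk
      subst hpk
      have := PySem.Dict.get?_of_mem_items _ hp hnd
      rw [hsome] at this
      exact (Option.some.injEq _ _).mp this.symm
    by_cases hv : kv.2 ∈ pvDedupLoop vsB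
    · -- A leaves its dict unchanged; B appends a duplicate that dedup removes
      refine ⟨?_, PySem.Dict.nodup_keys_insert _ _ _ hnd⟩
      rw [pvStepA, pvStepB, if_neg (by rw [hcA]; simp), hgetA, if_pos hv,
          PySem.Dict.items_insert_of_contains _ _ hcB, List.map_map, h1]
      refine (List.map_congr_left ?_).symm
      intro p hp
      by_cases hpk : p.1 = kv.1
      · have hp2 : p.2 = vsB := huniq p hp hpk
        simp only [Function.comp, pvF, hpk, hp2, beq_self_eq_true, if_pos]
        rw [← hvsB, pvDedupLoop_append, if_pos hv]
      · simp only [Function.comp, pvF]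
        rw [if_neg (by simp [hpk])]
    · -- A appends the new value; B appends it and dedup keeps it
      refine ⟨?_, PySem.Dict.nodup_keys_insert _ _ _ hnd⟩
      rw [pvStepA, pvStepB, if_neg (by rw [hcA]; simp), hgetA, if_neg hv,
          PySem.Dict.items_insert_of_contains _ _ hcA,
          PySem.Dict.items_insert_of_contains _ _ hcB, List.map_map, h1, List.map_map]
      refine List.map_congr_left ?_
      intro p hp
      by_cases hpk : p.1 = kv.1
      · have hp2 : p.2 = vsB := huniq p hp hpk
        simp only [Function.comp, pvF, hpk, hp2, beq_self_eq_true, if_pos]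
        rw [← hvsB, pvDedupLoop_append, if_neg hv]
      · simp only [Function.comp, pvF]
        rw [if_neg (by simp [hpk]), if_neg (by simp [hpk])]

lemma pvInv_inner (path : List (Int × Int)) :
    ∀ cA cB, pvInv cA cB → pvInv (path.foldl pvStepA cA) (path.foldl pvStepB cB) := by
  induction path with
  | nil => intro cA cB h; exact h
  | cons kv rest ih =>
    intro cA cB h
    exact ih _ _ (pvInv_step kv h)

lemma pvInv_outer (l : List (List (Int × Int))) :
    ∀ cA cB, pvInv cA cB →
      pvInv (l.foldl (fun c path => path.foldl pvStepA c) cA)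
            (l.foldl (fun d path => path.foldl pvStepB d) cB) := by
  induction l with
  | nil => intro cA cB h; exact h
  | cons path rest ih =>
    intro cA cB h
    exact ih _ _ (pvInv_inner path cA cB h)

-- ===== VERDICT (by name: the statement is the Claim_ definition above) =====
theorem combined_policies_spec : Claim_equal_combined_policies := by
  intro optimal_list _
  have h0 : pvInv PySem.Dict.empty PySem.Dict.empty := by
    constructor
    · rfl
    · exact PySem.Dict.nodup_keys_empty
  have h := pvInv_outer optimal_list PySem.Dict.empty PySem.Dict.empty h0
  show combined_policies optimal_list = combined_policies_alt optimal_list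
  rw [pvStepB_def, combined_policies]
  exact h.1
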